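-- pv_equiv track=rewrite | github.com/ClaudioCarvalhoo/you-can-accomplish-anything-with-just-enough-determination-and-a-little-bit-of-luck | problems/LC1895.py | buildColumnSum
-- ===== SOURCE A (Python) =====
-- def buildColumnSum(grid):
--     columnSum = []
--     for x in range(len(grid[0])):
--         columnSum.append([])
--         runningSum = 0
--         for y in range(len(grid)):
--             runningSum += grid[y][x]
--             columnSum[-1].append(runningSum)
--     return columnSum
-- ===== SOURCE B (Python) =====
-- def buildColumnSum(grid):
--     # divide-and-conquer prefix scan: prefix-sum each half, offset the right
--     # half by the left half's total
--     def prefix(col):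
--         if len(col) <= 1:
--             return list(col)
--         mid = len(col) // 2
--         left = prefix(col[:mid])
--         right = prefix(col[mid:])
--         return left + [left[-1] + v for v in right]
--     return [prefix([row[x] for row in grid]) for x in range(len(grid[0]))]
-- ===== Notes on version B (the rewrite author's own statement) =====
-- stated objective: alternative
-- what changed: B first transposes the grid into explicit column lists and then prefix-sums each column with a recursive divide-and-conquer scan (prefix-sum each half, offset the right half by the left half's total), instead of A's index-driven loops that push a scalar running sum down each column.
import Mathlib
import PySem

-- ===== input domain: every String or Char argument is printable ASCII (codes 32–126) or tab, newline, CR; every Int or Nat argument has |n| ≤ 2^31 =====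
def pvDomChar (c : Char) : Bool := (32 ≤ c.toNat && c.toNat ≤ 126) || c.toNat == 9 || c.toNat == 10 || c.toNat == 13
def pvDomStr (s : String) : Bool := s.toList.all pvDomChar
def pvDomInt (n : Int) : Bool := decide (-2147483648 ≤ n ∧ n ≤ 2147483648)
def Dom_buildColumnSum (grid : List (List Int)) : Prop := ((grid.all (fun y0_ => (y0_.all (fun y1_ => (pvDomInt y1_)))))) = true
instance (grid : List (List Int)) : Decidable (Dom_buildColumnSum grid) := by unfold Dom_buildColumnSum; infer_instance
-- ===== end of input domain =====

-- B transposes the grid into explicit column lists and prefix-sums each column by a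
-- divide-and-conquer scan (prefix-sum each half, offset the right half by the left
-- half's total), instead of A's sequential running-sum loops; objective: alternative.

-- ===== PORT A =====
-- column-outer: for each x, build the column's prefix sums by scanning all rows
def buildColumnSum (grid : List (List Int)) : List (List Int) :=
  (List.range (PySem.List.pyGetD grid (0 : Int) []).length).foldl
    (fun (columnSum : List (List Int)) (x : Nat) =>
      columnSum ++
        [((List.range grid.length).foldl
            (fun (st : Int × List Int) (y : Nat) =>
              let r := st.1 + PySem.List.pyGetD (PySem.List.pyGetD grid (y : Int) []) (x : Int) 0
              (r, st.2 ++ [r]))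
            ((0 : Int), ([] : List Int))).2])
    []

-- ===== PORT B =====
-- divide-and-conquer prefix scan of one column (Source B's inner 'prefix')
def pvPrefix (col : List Int) : List Int :=
  if h : col.length ≤ 1 then col
  else
    let mid := col.length / 2
    let left := pvPrefix (col.take mid)
    let right := pvPrefix (col.drop mid)
    left ++ right.map (fun v => PySem.List.pyGetD left (-1 : Int) 0 + v)
termination_by col.length
decreasing_by
  · simpa using Nat.lt_of_lt_of_le (Nat.div_lt_self (by omega) (by omega)) (Nat.le_refl _)
  · simp only [List.length_drop]
    omega

-- [prefix([row[x] for row in grid]) for x in range(len(grid[0]))]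
def buildColumnSum_alt (grid : List (List Int)) : List (List Int) :=
  (List.range (PySem.List.pyGetD grid (0 : Int) []).length).map
    (fun (x : Nat) => pvPrefix (grid.map (fun row => PySem.List.pyGetD row (x : Int) 0)))

-- ===== PRECONDITION & SPEC =====
-- Pre_ excludes exactly the inputs on which Python A raises IndexError: the empty grid
-- (grid[0]) and ragged grids where some row is shorter than row 0 (grid[y][x]).
def Pre_buildColumnSum (grid : List (List Int)) : Prop :=
  grid ≠ [] ∧ ∀ row ∈ grid, (grid.headD []).length ≤ row.length
instance (grid : List (List Int)) : Decidable (Pre_buildColumnSum grid) := by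
  unfold Pre_buildColumnSum; infer_instance
def pvWitness_buildColumnSum : List (List Int) := [[1, 2], [3, 4], [5, 6]]

def Spec_buildColumnSum (grid : List (List Int)) (out : List (List Int)) : Prop := out = buildColumnSum_alt grid
instance (grid : List (List Int)) (out : List (List Int)) : Decidable (Spec_buildColumnSum grid out) := by unfold Spec_buildColumnSum; infer_instance

-- ===== CLAIM (what is proved, stated in full; the proofs are below) =====
def Claim_equal_buildColumnSum : Prop := ∀ (grid : List (List Int)), Dom_buildColumnSum grid → Pre_buildColumnSum grid → Spec_buildColumnSum grid (buildColumnSum grid)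

-- ===== LEMMAS AND PROOFS =====

-- pvG grid y x = grid[y][x] as port A reads it (pyGetD with defaults)
def pvG (grid : List (List Int)) (y x : Nat) : Int :=
  PySem.List.pyGetD (PySem.List.pyGetD grid (y : Int) []) (x : Int) 0

-- pvS grid x k = sum of column x over the first k rows
def pvS (grid : List (List Int)) (x k : Nat) : Int :=
  ((List.range k).map (fun y => pvG grid y x)).sum

-- pvP grid x k = the prefix-sum list of column x over the first k rows
def pvP (grid : List (List Int)) (x k : Nat) : List Int :=
  (List.range k).map (fun y => pvS grid x (y + 1))

-- pref col = the inclusive prefix-sum list of col (specification of pvPrefix)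
def pref (col : List Int) : List Int :=
  (List.range col.length).map (fun k => (col.take (k + 1)).sum)

theorem pvS_succ (grid : List (List Int)) (x k : Nat) :
    pvS grid x (k + 1) = pvS grid x k + pvG grid k x := by
  simp [pvS, List.range_succ]

theorem pvP_succ (grid : List (List Int)) (x k : Nat) :
    pvP grid x (k + 1) = pvP grid x k ++ [pvS grid x (k + 1)] := by
  simp [pvP, List.range_succ]

-- A's inner loop computes the running sum and the prefix-sum list of column x
theorem pvA_inner (grid : List (List Int)) (x : Nat) (n : Nat) :
    (List.range n).foldl
      (fun (st : Int × List Int) (y : Nat) =>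
        let r := st.1 + pvG grid y x
        (r, st.2 ++ [r]))
      ((0 : Int), ([] : List Int)) = (pvS grid x n, pvP grid x n) := by
  induction n with
  | zero => simp [pvS, pvP]
  | succ k ih =>
      rw [List.range_succ, List.foldl_append, ih]
      simp [pvS_succ, pvP_succ]

-- A returns the per-column prefix-sum lists
theorem pvA_eq (grid : List (List Int)) :
    buildColumnSum grid =
      (List.range (PySem.List.pyGetD grid (0 : Int) []).length).map
        (fun x => pvP grid x grid.length) := by
  unfold buildColumnSum
  rw [PySem.List.foldl_append_singleton_eq_map, List.nil_append]
  refine List.map_congr_left (fun x _ => ?_)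
  exact congrArg Prod.snd (pvA_inner grid x grid.length)

-- pref splits at any nonempty left part
theorem pref_append (l r : List Int) :
    pref (l ++ r) = pref l ++ (pref r).map (fun v => l.sum + v) := by
  unfold pref
  rw [List.length_append, List.range_add, List.map_append, List.map_map]
  congr 1
  · refine List.map_congr_left (fun k hk => ?_)
    rw [List.take_append_of_le_length (by have := List.mem_range.mp hk; omega)]
  · rw [List.map_map]
    refine List.map_congr_left (fun k hk => ?_)
    show ((l ++ r).take (l.length + k + 1)).sum = l.sum + (r.take (k + 1)).sum
    rw [Nat.add_assoc, List.take_append, List.sum_append,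
      List.take_of_length_le (by omega : l.length ≤ l.length + (k + 1))]
    have : l.length + (k + 1) - l.length = k + 1 := by omega
    rw [this]

theorem pref_length (col : List Int) : (pref col).length = col.length := by
  simp [pref]

-- the last entry of pref l is the total of l
theorem pref_last (l : List Int) (hl : l ≠ []) :
    PySem.List.pyGetD (pref l) (-1 : Int) 0 = l.sum := by
  have hne : pref l ≠ [] := by
    intro h
    have := pref_length l
    rw [h] at this
    exact hl (List.eq_nil_of_length_eq_zero this.symm)
  rw [PySem.List.pyGetD_neg_one _ _ hne]
  have hlen : 0 < l.length := List.length_pos_of_ne_nil hl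
  rw [List.getLast_eq_getElem]
  unfold pref
  simp only [List.getElem_map, List.getElem_range, List.length_map, List.length_range]
  have : l.length - 1 + 1 = l.length := by omega
  rw [this, List.take_length]

-- pvPrefix computes the inclusive prefix sums
theorem pvPrefix_eq_pref (col : List Int) : pvPrefix col = pref col := by
  induction col using pvPrefix.induct with
  | case1 col h =>
      rw [pvPrefix]
      rw [dif_pos h]
      match col, h with
      | [], _ => simp [pref]
      | [a], _ => simp [pref]
  | case2 col h mid ihl ihr =>
      rw [pvPrefix, dif_neg h]
      simp only []
      have htk : col.take mid ≠ [] := by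
        have hlen : 0 < (col.take mid).length := by
          rw [List.length_take]
          show 0 < min (col.length / 2) col.length
          omega
        exact List.ne_nil_of_length_pos hlen
      rw [ihl, ihr, pref_last _ htk, ← pref_append _ _, List.take_append_drop]

-- the column list B builds is column x read through pvG
theorem pv_col_eq (grid : List (List Int)) (x : Nat) :
    grid.map (fun row => PySem.List.pyGetD row (x : Int) 0) =
      (List.range grid.length).map (fun y => pvG grid y x) := by
  apply List.ext_getElem
  · simp
  · intro i hi hi2
    simp only [List.getElem_map, List.getElem_range, pvG]
    rw [PySem.List.pyGetD_natCast]
    rw [List.getD_eq_getElem?_getD]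
    simp_all

-- pref of column x is A's pvP
theorem pv_pref_col (grid : List (List Int)) (x : Nat) :
    pref ((List.range grid.length).map (fun y => pvG grid y x)) =
      pvP grid x grid.length := by
  unfold pref pvP
  simp only [List.length_map, List.length_range]
  refine List.map_congr_left (fun k hk => ?_)
  have hk' := List.mem_range.mp hk
  rw [← List.map_take, List.take_range]
  have : min (k + 1) grid.length = k + 1 := by omega
  rw [this]
  rfl

-- the two ports agree on every input
theorem pv_ports_eq (grid : List (List Int)) :
    buildColumnSum grid = buildColumnSum_alt grid := by
  rw [pvA_eq]
  unfold buildColumnSum_alt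
  refine List.map_congr_left (fun x _ => ?_)
  rw [pvPrefix_eq_pref, pv_col_eq, pv_pref_col]

-- ===== VERDICT (by name: the statement is the Claim_ definition above) =====
theorem buildColumnSum_spec : Claim_equal_buildColumnSum := by
  intro grid _ _
  unfold Spec_buildColumnSum
  exact pv_ports_eq grid
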